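-- pv_equiv track=rewrite | github.com/Easy-BS/v0.1.1 | easybs/CALI_flow/nodes/Add_infil.py | month_set_to_runperiods
-- ===== SOURCE A (Python) =====
-- from typing import Dict, List, Tuple
--
-- def month_set_to_runperiods(months: List[int]) -> List[Tuple[int, int, int, int, str]]:
--     mset = sorted(set(months))
--     if not mset:
--         raise ValueError("No months provided.")
--
--     blocks: List[List[int]] = []
--     cur = [mset[0]]
--     for m in mset[1:]:
--         if m == cur[-1] + 1:
--             cur.append(m)
--         else:
--             blocks.append(cur)
--             cur = [m]
--     blocks.append(cur)
--
--     if len(blocks) > 2: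
--         raise ValueError(
--             f"Quick mode supports at most 2 month blocks; got {len(blocks)} blocks: {blocks}. "
--             "Consider simulating the full year and ignoring unmeasured months."
--         )
--
--     def end_day(mm: int) -> int:
--         return {1: 31, 2: 28, 3: 31, 4: 30, 5: 31, 6: 30, 7: 31, 8: 31, 9: 30, 10: 31, 11: 30, 12: 31}[mm]
--
--     out = []
--     for i, b in enumerate(blocks, start=1):
--         bm, em = b[0], b[-1]
--         out.append((bm, 1, em, end_day(em), f"Cali_RunPeriod_{i}"))
--     return out
-- ===== SOURCE B (Python) =====
-- from typing import Dict, List, Tuple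
--
-- def month_set_to_runperiods(months: List[int]) -> List[Tuple[int, int, int, int, str]]:
--     mset = sorted(set(months))
--     if not mset:
--         raise ValueError("No months provided.")
--
--     # A run boundary is a membership fact, not loop state: m starts a block iff m-1 is
--     # absent, ends one iff m+1 is absent; zipping the two boundary lists gives the blocks.
--     starts = [m for m in mset if m - 1 not in mset]
--     ends = [m for m in mset if m + 1 not in mset]
--
--     if len(starts) > 2:
--         blocks = [list(range(b, e + 1)) for b, e in zip(starts, ends)]
--         raise ValueError(
--             f"Quick mode supports at most 2 month blocks; got {len(blocks)} blocks: {blocks}. "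
--             "Consider simulating the full year and ignoring unmeasured months."
--         )
--
--     END = [31, 28, 31, 30, 31, 30, 31, 31, 30, 31, 30, 31]
--     return [(b, 1, e, END[e - 1], f"Cali_RunPeriod_{i}")
--             for i, (b, e) in enumerate(zip(starts, ends), start=1)]
-- ===== Notes on version B (the rewrite author's own statement) =====
-- stated objective: alternative
-- what changed: B replaces A's sequential run-building loop (accumulating lists of consecutive months in mutable state) with stateless boundary detection: a month starts a block iff m-1 is absent and ends one iff m+1 is absent, so blocks are obtained by zipping two membership-filtered lists.
import Mathlib
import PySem

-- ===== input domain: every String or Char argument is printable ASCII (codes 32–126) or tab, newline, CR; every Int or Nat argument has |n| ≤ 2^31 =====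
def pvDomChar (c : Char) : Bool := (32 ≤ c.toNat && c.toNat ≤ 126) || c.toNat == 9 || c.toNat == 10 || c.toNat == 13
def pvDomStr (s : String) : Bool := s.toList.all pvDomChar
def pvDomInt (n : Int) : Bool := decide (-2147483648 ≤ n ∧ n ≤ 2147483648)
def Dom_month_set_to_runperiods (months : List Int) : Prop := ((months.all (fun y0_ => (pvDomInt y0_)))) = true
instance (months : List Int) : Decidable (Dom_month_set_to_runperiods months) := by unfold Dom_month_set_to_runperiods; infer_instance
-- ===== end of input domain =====

-- B replaces A's sequential run-building loop by stateless boundary detection (m starts a block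
-- iff m-1 absent, ends one iff m+1 absent) and a list month-length table (objective: alternative).


-- ===== PORT A =====
-- dict literal {1: 31, …}[mm]; a KeyError (mm outside 1..12) is excluded by Pre_, ported with default 0
def endDayA (mm : Int) : Int :=
  ((PySem.Dict.ofList
      [((1:Int),(31:Int)),(2,28),(3,31),(4,30),(5,31),(6,30),(7,31),(8,31),(9,30),(10,31),(11,30),(12,31)]).get?
    mm).getD 0

-- the 'for m in mset[1:]' loop of A, state = (blocks, cur)
def loopA (st : List (List Int) × List Int) : List Int → List (List Int) × List Int
  | [] => st
  | m :: rest =>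
      loopA (if m = PySem.List.pyGetD st.2 (-1) 0 + 1
             then (st.1, st.2 ++ [m])
             else (st.1 ++ [st.2], [m])) rest

def month_set_to_runperiods (months : List Int) : List (Int × Int × Int × Int × String) :=
  let mset := PySem.List.sorted (PySem.Set.ofList months) (fun x => x) false
  match mset with
  | [] => []  -- raise ValueError("No months provided."): excluded by Pre_
  | m0 :: rest =>
    let st := loopA ([], [m0]) rest
    let blocks := st.1 ++ [st.2]
    if blocks.length > 2 then []  -- raise ValueError("Quick mode …"): excluded by Pre_
    else (PySem.List.enumerate blocks 1).map (fun p =>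
      (PySem.List.pyGetD p.2 0 0, 1, PySem.List.pyGetD p.2 (-1) 0,
       endDayA (PySem.List.pyGetD p.2 (-1) 0),
       "Cali_RunPeriod_" ++ PySem.Int.toStr p.1))

-- ===== PORT B =====
-- END[em - 1] on the 12-entry list table; an IndexError outside it is excluded by Pre_
def endDayB (em : Int) : Int :=
  PySem.List.pyGetD [(31:Int),28,31,30,31,30,31,31,30,31,30,31] (em - 1) 0

def month_set_to_runperiods_alt (months : List Int) : List (Int × Int × Int × Int × String) :=
  let mset := PySem.List.sorted (PySem.Set.ofList months) (fun x => x) false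
  match mset with
  | [] => []  -- raise ValueError("No months provided."): excluded by Pre_
  | m0 :: rest =>
    let mset := m0 :: rest
    let starts := mset.filter (fun m => decide ((m - 1) ∉ mset))
    let ends := mset.filter (fun m => decide ((m + 1) ∉ mset))
    if starts.length > 2 then []  -- raise ValueError("Quick mode …"): excluded by Pre_
    else (PySem.List.enumerate (starts.zip ends) 1).map (fun p =>
      (p.2.1, 1, p.2.2, endDayB p.2.2, "Cali_RunPeriod_" ++ PySem.Int.toStr p.1))

-- ===== PRECONDITION & SPEC =====
-- Pre_ excludes exactly the inputs on which A raises: an empty month list (ValueError), more than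
-- two maximal runs of consecutive distinct months (ValueError), and a run whose last month lies
-- outside 1..12 (KeyError in the end-day dict lookup).
def Pre_month_set_to_runperiods (months : List Int) : Prop :=
  months ≠ [] ∧
  ((PySem.Set.ofList months).countP (fun m => decide ((m - 1) ∉ months))) ≤ 2 ∧
  (∀ m ∈ months, (m + 1) ∉ months → 1 ≤ m ∧ m ≤ 12)
instance (months : List Int) : Decidable (Pre_month_set_to_runperiods months) := by
  unfold Pre_month_set_to_runperiods; infer_instance

def pvWitness_month_set_to_runperiods : List Int := [11, 12, 2, 3, 3]

def Spec_month_set_to_runperiods (months : List Int) (out : List (Int × Int × Int × Int × String)) : Prop := out = month_set_to_runperiods_alt months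
instance (months : List Int) (out : List (Int × Int × Int × Int × String)) : Decidable (Spec_month_set_to_runperiods months out) := by unfold Spec_month_set_to_runperiods; infer_instance

-- ===== CLAIM (what is proved, stated in full; the proofs are below) =====
def Claim_equal_month_set_to_runperiods : Prop := ∀ (months : List Int), Dom_month_set_to_runperiods months → Pre_month_set_to_runperiods months → Spec_month_set_to_runperiods months (month_set_to_runperiods months)

-- ===== LEMMAS AND PROOFS =====

-- the canonical (start, end) pairs of the maximal consecutive runs of l, by structural recursion
def runsE : List Int → List (Int × Int)
  | [] => []
  | m :: t =>
    match runsE t with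
    | [] => [(m, m)]
    | (s, e) :: bs => if s = m + 1 then (m, e) :: bs else (m, m) :: (s, e) :: bs

-- merging a pending run c into the runs of the remaining suffix
def mergeP (c : Int × Int) (bs : List (Int × Int)) : List (Int × Int) :=
  match bs with
  | [] => [c]
  | (s, e) :: bs' => if s = c.2 + 1 then (c.1, e) :: bs' else c :: (s, e) :: bs'

def projA (b : List Int) : Int × Int := (PySem.List.pyGetD b 0 0, PySem.List.pyGetD b (-1) 0)

theorem runsE_head (m : Int) (t : List Int) : ∃ e bs, runsE (m :: t) = (m, e) :: bs := by
  simp only [runsE]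
  rcases h : runsE t with _ | ⟨⟨s, e⟩, bs⟩
  · exact ⟨m, [], rfl⟩
  · by_cases hs : s = m + 1 <;> simp [hs]

theorem runsE_nil_iff (t : List Int) : runsE t = [] ↔ t = [] := by
  cases t with
  | nil => simp [runsE]
  | cons m t' =>
    obtain ⟨e, bs, h⟩ := runsE_head m t'
    simp [h]

theorem mergeP_self (m : Int) (l : List Int) : mergeP (m, m) (runsE l) = runsE (m :: l) := by
  simp only [runsE]
  rcases runsE l with _ | ⟨⟨s, e⟩, bs⟩ <;> simp [mergeP]

theorem mergeP_step (s p m : Int) (hm : m = p + 1) (l : List Int) :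
    mergeP (s, m) (runsE l) = mergeP (s, p) (runsE (m :: l)) := by
  subst hm
  simp only [runsE]
  rcases runsE l with _ | ⟨⟨s', e⟩, bs⟩
  · simp [mergeP]
  · by_cases hs : s' = p + 1 + 1 <;> simp [mergeP, hs]

theorem mergeP_break (c : Int × Int) (m : Int) (hm : ¬ m = c.2 + 1) (l : List Int) :
    c :: mergeP (m, m) (runsE l) = mergeP c (runsE (m :: l)) := by
  rw [mergeP_self]
  obtain ⟨e, bs, h⟩ := runsE_head m l
  rw [h]
  simp [mergeP, hm]

theorem pyGetD_singleton_neg_one (m : Int) : PySem.List.pyGetD [m] (-1) 0 = m := by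
  have := PySem.List.pyGetD_neg_one_append_singleton (xs := ([] : List Int)) (x := m) (d := 0)
  simpa using this

theorem projA_append_singleton (cur : List Int) (m : Int) (h : cur ≠ []) :
    projA (cur ++ [m]) = (PySem.List.pyGetD cur 0 0, m) := by
  unfold projA
  have h1 : PySem.List.pyGetD (cur ++ [m]) 0 0 = PySem.List.pyGetD cur 0 0 := by
    cases cur with
    | nil => exact absurd rfl h
    | cons c cs => simp [PySem.List.pyGetD_zero_cons, List.cons_append]
  rw [h1, PySem.List.pyGetD_neg_one_append_singleton]

theorem loopA_eq (rest : List Int) : ∀ (blocks : List (List Int)) (cur : List Int), cur ≠ [] →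
    ((loopA (blocks, cur) rest).1 ++ [(loopA (blocks, cur) rest).2]).map projA =
      blocks.map projA ++ mergeP (projA cur) (runsE rest) := by
  induction rest with
  | nil => intro blocks cur _; simp [loopA, mergeP, runsE]
  | cons m rest' ih =>
    intro blocks cur hcur
    by_cases hm : m = PySem.List.pyGetD cur (-1) 0 + 1
    · have hstep : (if m = PySem.List.pyGetD cur (-1) 0 + 1
          then (blocks, cur ++ [m]) else (blocks ++ [cur], [m])) = (blocks, cur ++ [m]) := by
        simp [hm]
      simp only [loopA, hstep]
      rw [ih blocks (cur ++ [m]) (by simp)]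
      rw [projA_append_singleton cur m hcur]
      rw [mergeP_step (PySem.List.pyGetD cur 0 0) (PySem.List.pyGetD cur (-1) 0) m hm]
      rfl
    · have hstep : (if m = PySem.List.pyGetD cur (-1) 0 + 1
          then (blocks, cur ++ [m]) else (blocks ++ [cur], [m])) = (blocks ++ [cur], [m]) := by
        simp [hm]
      simp only [loopA, hstep]
      rw [ih (blocks ++ [cur]) [m] (by simp)]
      have hproj : projA [m] = (m, m) := by
        simp [projA, PySem.List.pyGetD_zero_cons, pyGetD_singleton_neg_one]
      rw [hproj, List.map_append]
      rw [List.append_assoc]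
      congr 1
      simpa using mergeP_break (projA cur) m hm rest'

-- every run end e of runsE l satisfies e ∈ l and e + 1 ∉ l, for a strictly increasing l
theorem runsE_ends (l : List Int) (hl : l.Pairwise (· < ·)) :
    ∀ q ∈ runsE l, q.2 ∈ l ∧ q.2 + 1 ∉ l := by
  induction l with
  | nil => simp [runsE]
  | cons m t ih =>
    have hp : ∀ y ∈ t, m < y := (List.pairwise_cons.mp hl).1
    have ih' := ih (List.pairwise_cons.mp hl).2
    intro q hq
    rcases ht : runsE t with _ | ⟨⟨s, e⟩, bs⟩
    · have ht' : t = [] := (runsE_nil_iff t).mp ht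
      subst ht'
      simp only [runsE] at hq
      simp only [List.mem_singleton] at hq
      subst hq
      exact ⟨by simp, by simp⟩
    · have hmem : ∀ q' ∈ runsE t, q'.2 ∈ m :: t ∧ q'.2 + 1 ∉ m :: t := by
        intro q' hq'
        obtain ⟨h1, h2⟩ := ih' q' hq'
        have hlt := hp _ h1
        refine ⟨List.mem_cons_of_mem _ h1, ?_⟩
        simp only [List.mem_cons]
        rintro (h | h)
        · omega
        · exact h2 h
      simp only [runsE, ht] at hq
      by_cases hs : s = m + 1
      · rw [if_pos hs] at hq
        rcases List.mem_cons.mp hq with hq | hq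
        · subst hq
          exact hmem (s, e) (ht ▸ List.mem_cons_self)
        · exact hmem q (ht ▸ List.mem_cons_of_mem _ hq)
      · rw [if_neg hs] at hq
        simp only [List.mem_cons] at hq
        rcases hq with hq | hq | hq
        · subst hq
          have htne : t ≠ [] := by
            intro h; rw [h] at ht; simp [runsE] at ht
          obtain ⟨t0, t', rfl⟩ := List.exists_cons_of_ne_nil htne
          obtain ⟨e', bs', hh⟩ := runsE_head t0 t'
          rw [hh] at ht
          have hst0 : s = t0 := by injection ht with h1 _; injection h1 with h _; omega
          subst hst0
          have hmt0 : m < s := hp _ List.mem_cons_self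
          have hmin : ∀ y ∈ t', s < y := (List.pairwise_cons.mp (List.pairwise_cons.mp hl).2).1
          refine ⟨List.mem_cons_self, ?_⟩
          simp only [List.mem_cons]
          rintro (h | h | h)
          · omega
          · omega
          · have := hmin _ h; omega
        · subst hq
          exact hmem (s, e) (ht ▸ List.mem_cons_self)
        · exact hmem q (ht ▸ List.mem_cons_of_mem _ hq)

-- starts of the maximal runs = boundary filter "m - 1 absent", for a strictly increasing l
theorem runsE_map_fst : ∀ (l : List Int), l.Pairwise (· < ·) →
    (runsE l).map Prod.fst = l.filter (fun m => decide ((m - 1) ∉ l)) := by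
  intro l
  induction l with
  | nil => intro _; simp [runsE]
  | cons m t ih =>
    intro hl
    have hp : ∀ y ∈ t, m < y := (List.pairwise_cons.mp hl).1
    have ih' := ih (List.pairwise_cons.mp hl).2
    have hmhead : (m - 1) ∉ (m :: t) := by
      simp only [List.mem_cons]
      rintro (h | h)
      · omega
      · have := hp _ h; omega
    cases t with
    | nil => simp [runsE]
    | cons t0 t' =>
      obtain ⟨e, bs, hh⟩ := runsE_head t0 t'
      have ht0 : m < t0 := hp _ List.mem_cons_self
      have ht' : ∀ y ∈ t', t0 < y := (List.pairwise_cons.mp (List.pairwise_cons.mp hl).2).1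
      have ht0pass : (t0 - 1) ∉ (t0 :: t') := by
        simp only [List.mem_cons]
        rintro (h | h)
        · omega
        · have := ht' _ h; omega
      rw [List.filter_cons_of_pos (by simpa using hmhead)]
      have hr0 : runsE (m :: t0 :: t') =
          if t0 = m + 1 then (m, e) :: bs else (m, m) :: (t0, e) :: bs := by
        rw [runsE, hh]
      by_cases hs : t0 = m + 1
      · rw [hr0, if_pos hs]
        rw [hh, List.filter_cons_of_pos (by simpa using ht0pass)] at ih'
        have hbs : bs.map Prod.fst = t'.filter (fun x => decide ((x - 1) ∉ (t0 :: t'))) := by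
          simp only [List.map_cons, List.cons.injEq] at ih'
          exact ih'.2
        have ht0fail : ((t0 : Int) - 1) ∈ (m :: t0 :: t') := by
          simp only [List.mem_cons]; left; omega
        rw [List.filter_cons_of_neg (by simp only [decide_eq_true_eq, not_not]; exact ht0fail)]
        have hcong : t'.filter (fun x => decide ((x - 1) ∉ (m :: t0 :: t'))) =
            t'.filter (fun x => decide ((x - 1) ∉ (t0 :: t'))) := by
          apply List.filter_congr
          intro x hx
          have hxgt : t0 < x := ht' _ hx
          apply decide_eq_decide.mpr
          constructor
          · intro h hmem; exact h (List.mem_cons_of_mem _ hmem)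
          · intro h hmem
            rcases List.mem_cons.mp hmem with hm | hm
            · omega
            · exact h hm
        simp only [List.map_cons, hbs, hcong]
      · rw [hr0, if_neg hs]
        have hcong : (t0 :: t').filter (fun x => decide ((x - 1) ∉ (m :: t0 :: t'))) =
            (t0 :: t').filter (fun x => decide ((x - 1) ∉ (t0 :: t'))) := by
          apply List.filter_congr
          intro x hx
          have hxgt : m < x := hp _ hx
          have hxge : t0 ≤ x := by
            rcases List.mem_cons.mp hx with h | h
            · omega
            · have := ht' _ h; omega
          apply decide_eq_decide.mpr
          constructor
          · intro h hmem; exact h (List.mem_cons_of_mem _ hmem)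
          · intro h hmem
            rcases List.mem_cons.mp hmem with hm | hm
            · omega
            · exact h hm
        rw [hcong, ← ih', hh]
        simp

-- ends of the maximal runs = boundary filter "m + 1 absent", for a strictly increasing l
theorem runsE_map_snd : ∀ (l : List Int), l.Pairwise (· < ·) →
    (runsE l).map Prod.snd = l.filter (fun m => decide ((m + 1) ∉ l)) := by
  intro l
  induction l with
  | nil => intro _; simp [runsE]
  | cons m t ih =>
    intro hl
    have hp : ∀ y ∈ t, m < y := (List.pairwise_cons.mp hl).1
    have ih' := ih (List.pairwise_cons.mp hl).2
    cases t with
    | nil =>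
      simp [runsE]
    | cons t0 t' =>
      obtain ⟨e, bs, hh⟩ := runsE_head t0 t'
      have ht0 : m < t0 := hp _ List.mem_cons_self
      have ht' : ∀ y ∈ t', t0 < y := (List.pairwise_cons.mp (List.pairwise_cons.mp hl).2).1
      have hcongtail : ∀ (lo : Int), m + 1 ≤ lo → (∀ y ∈ (t0 :: t'), lo ≤ y) →
          (t0 :: t').filter (fun x => decide ((x + 1) ∉ (m :: t0 :: t'))) =
          (t0 :: t').filter (fun x => decide ((x + 1) ∉ (t0 :: t'))) := by
        intro lo hlo hall
        apply List.filter_congr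
        intro x hx
        have hxge : lo ≤ x := hall _ hx
        apply decide_eq_decide.mpr
        constructor
        · intro h hmem; exact h (List.mem_cons_of_mem _ hmem)
        · intro h hmem
          rcases List.mem_cons.mp hmem with hm | hm
          · omega
          · exact h hm
      have hge : ∀ y ∈ (t0 :: t'), t0 ≤ y := by
        intro y hy
        rcases List.mem_cons.mp hy with h | h
        · omega
        · have := ht' _ h; omega
      have hr0 : runsE (m :: t0 :: t') =
          if t0 = m + 1 then (m, e) :: bs else (m, m) :: (t0, e) :: bs := by
        rw [runsE, hh]
      by_cases hs : t0 = m + 1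
      · rw [hr0, if_pos hs]
        have hmfail : ((m : Int) + 1) ∈ (m :: t0 :: t') := by
          simp only [List.mem_cons]; right; left; omega
        rw [List.filter_cons_of_neg (by simp only [decide_eq_true_eq, not_not]; exact hmfail)]
        rw [hcongtail t0 (by omega) hge, ← ih', hh]
        simp
      · rw [hr0, if_neg hs]
        have hmpass : ((m : Int) + 1) ∉ (m :: t0 :: t') := by
          simp only [List.mem_cons]
          rintro (h | h | h)
          · omega
          · omega
          · have := ht' _ h; omega
        rw [List.filter_cons_of_pos (by simpa using hmpass)]
        rw [hcongtail t0 (by omega) hge, ← ih', hh]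
        simp

theorem zip_fst_snd {α β : Type} (l : List (α × β)) :
    (l.map Prod.fst).zip (l.map Prod.snd) = l := by
  induction l with
  | nil => rfl
  | cons p t ih => simp [ih]

theorem endDay_eq (e : Int) (h1 : 1 ≤ e) (h2 : e ≤ 12) : endDayA e = endDayB e := by
  interval_cases e <;> decide

theorem enumerate_map_proj {α β γ : Type} (xs : List α) (f : α → β) (g : Int → β → γ) :
    ∀ s : Int, (PySem.List.enumerate xs s).map (fun p => g p.1 (f p.2)) =
      (PySem.List.enumerate (xs.map f) s).map (fun p => g p.1 p.2) := by
  induction xs with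
  | nil => intro s; simp [PySem.List.enumerate_nil]
  | cons x xs ih => intro s; simp [PySem.List.enumerate_cons, ih]

theorem mem_of_mem_enumerate {α : Type} {p : Int × α} {xs : List α} {s : Int}
    (h : p ∈ PySem.List.enumerate xs s) : p.2 ∈ xs := by
  rw [PySem.List.mem_enumerate_iff] at h
  obtain ⟨k, hk, rfl⟩ := h
  exact List.getElem_mem hk

-- ===== VERDICT (by name: the statement is the Claim_ definition above) =====
theorem month_set_to_runperiods_spec : Claim_equal_month_set_to_runperiods := by
  intro months _ hpre
  obtain ⟨-, -, hrange⟩ := hpre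
  unfold Spec_month_set_to_runperiods month_set_to_runperiods month_set_to_runperiods_alt
  rcases hmset : PySem.List.sorted (PySem.Set.ofList months) (fun x => x) false with _ | ⟨m0, rest⟩
  · rfl
  · simp only []
    have hpw : (m0 :: rest).Pairwise (· < ·) := by
      rw [← hmset]; exact PySem.List.sorted_ofList_pairwise_lt (xs := months)
    have hA : ((loopA ([], [m0]) rest).1 ++ [(loopA ([], [m0]) rest).2]).map projA =
        runsE (m0 :: rest) := by
      rw [loopA_eq rest [] [m0] (by simp)]
      have : projA [m0] = (m0, m0) := by
        simp [projA, PySem.List.pyGetD_zero_cons, pyGetD_singleton_neg_one]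
      rw [this]
      simpa using mergeP_self m0 rest
    set blocksA := (loopA ([], [m0]) rest).1 ++ [(loopA ([], [m0]) rest).2] with hblk
    have hstarts : (m0 :: rest).filter (fun m => decide ((m - 1) ∉ (m0 :: rest))) =
        (runsE (m0 :: rest)).map Prod.fst := (runsE_map_fst _ hpw).symm
    have hends : (m0 :: rest).filter (fun m => decide ((m + 1) ∉ (m0 :: rest))) =
        (runsE (m0 :: rest)).map Prod.snd := (runsE_map_snd _ hpw).symm
    rw [hstarts, hends, zip_fst_snd]
    have hlenA : blocksA.length = (runsE (m0 :: rest)).length := by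
      have := congrArg List.length hA
      simpa using this
    have hlenS : ((runsE (m0 :: rest)).map Prod.fst).length = (runsE (m0 :: rest)).length := by
      simp
    rw [hlenA, hlenS]
    by_cases hg : (runsE (m0 :: rest)).length > 2
    · simp [hg]
    · simp only [hg, if_false]
      have hAmap : (PySem.List.enumerate blocksA 1).map (fun p =>
          (PySem.List.pyGetD p.2 0 0, 1, PySem.List.pyGetD p.2 (-1) 0,
           endDayA (PySem.List.pyGetD p.2 (-1) 0), "Cali_RunPeriod_" ++ PySem.Int.toStr p.1)) =
          (PySem.List.enumerate (runsE (m0 :: rest)) 1).map (fun p =>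
          ((p.2.1 : Int), (1 : Int), p.2.2, endDayA p.2.2, "Cali_RunPeriod_" ++ PySem.Int.toStr p.1)) := by
        have := enumerate_map_proj blocksA projA
          (fun i q => ((q.1 : Int), (1 : Int), q.2, endDayA q.2, "Cali_RunPeriod_" ++ PySem.Int.toStr i)) 1
        simp only [projA] at this
        rw [this, hA]
      rw [hAmap]
      apply List.map_congr_left
      intro p hp
      have hpruns : p.2 ∈ runsE (m0 :: rest) := mem_of_mem_enumerate hp
      obtain ⟨hmem, hnot⟩ := runsE_ends (m0 :: rest) hpw p.2 hpruns
      have hmem' : p.2.2 ∈ months := by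
        rw [← hmset, PySem.List.mem_sorted] at hmem
        exact (PySem.Set.mem_ofList (xs := months) _).mp hmem
      have hnot' : p.2.2 + 1 ∉ months := by
        intro h
        apply hnot
        rw [← hmset, PySem.List.mem_sorted]
        exact (PySem.Set.mem_ofList (xs := months) _).mpr h
      obtain ⟨h1, h2⟩ := hrange _ hmem' hnot'
      rw [endDay_eq _ h1 h2]
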